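-- pv_equiv track=rewrite | github.com/alexeygrigorev/merm | src/pymermaid/layout/__init__.py | _insert_dummy_nodes
-- ===== SOURCE A (Python) =====
-- def _insert_dummy_nodes(
--     layers: dict[str, int],
--     edges: list[tuple[str, str, int]],
-- ) -> tuple[dict[str, int], list[tuple[str, str, int]], dict[str, tuple[str, str, int]]]:
--     """Insert dummy nodes for edges spanning more than one layer.
--
--     Returns (updated_layers, new_edges, dummy_info).
--     dummy_info maps dummy_node_id -> original (source, target, idx).
--     """
--     new_layers = dict(layers)
--     new_edges: list[tuple[str, str, int]] = []
--     dummy_info: dict[str, tuple[str, str, int]] = {}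
--     dummy_counter = 0
--
--     for s, t, idx in edges:
--         ls = new_layers[s]
--         lt = new_layers[t]
--         span = lt - ls
--         if span <= 1:
--             new_edges.append((s, t, idx))
--         else:
--             # Create chain of dummy nodes
--             prev = s
--             for i in range(1, span):
--                 dummy_id = f"__dummy_{dummy_counter}"
--                 dummy_counter += 1
--                 new_layers[dummy_id] = ls + i
--                 dummy_info[dummy_id] = (s, t, idx)
--                 new_edges.append((prev, dummy_id, idx))
--                 prev = dummy_id
--             new_edges.append((prev, t, idx))
--
--     return new_layers, new_edges, dummy_info
-- ===== SOURCE B (Python) =====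
-- def _insert_dummy_nodes(
--     layers: dict[str, int],
--     edges: list[tuple[str, str, int]],
-- ) -> tuple[dict[str, int], list[tuple[str, str, int]], dict[str, tuple[str, str, int]]]:
--     """Insert dummy nodes for edges spanning more than one layer.
--
--     Plan-then-assemble formulation: pass 1 walks the edges once, assigning each
--     edge a closed-form block of dummy ids (offset = running total) and its dummy
--     layer entries, recording a schedule (s, t, idx, ls, count, offset); passes 2
--     and 3 then assemble dummy_info and new_edges independently from the schedule,
--     pairing consecutive nodes of each edge's materialized path.
--     """
--     new_layers = dict(layers)
--     schedule = []
--     total = 0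
--     for s, t, idx in edges:
--         ls = new_layers[s]
--         c = max(new_layers[t] - ls - 1, 0)
--         schedule.append((s, t, idx, ls, c, total))
--         for k in range(c):
--             new_layers["__dummy_{}".format(total + k)] = ls + 1 + k
--         total += c
--
--     dummy_info = {
--         "__dummy_{}".format(off + k): (s, t, idx)
--         for s, t, idx, _ls, c, off in schedule
--         for k in range(c)
--     }
--
--     new_edges = []
--     for s, t, idx, _ls, c, off in schedule:
--         path = [s] + ["__dummy_{}".format(off + k) for k in range(c)] + [t]
--         new_edges.extend((a, b, idx) for a, b in zip(path, path[1:]))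
--
--     return new_layers, new_edges, dummy_info
-- ===== Notes on version B (the rewrite author's own statement) =====
-- stated objective: alternative
-- what changed: Replaced A's single interleaved loop (which threads a `prev` node and emits dummy layers, info entries and edges all in one place) by a plan-then-assemble algorithm: pass 1 assigns each edge a closed-form block of dummy ids and records a schedule (s, t, idx, ls, count, offset); dummy_info and new_edges are then assembled by two independent passes over the schedule, new_edges by pairing consecutive nodes of each edge's materialized path.
import Mathlib
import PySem

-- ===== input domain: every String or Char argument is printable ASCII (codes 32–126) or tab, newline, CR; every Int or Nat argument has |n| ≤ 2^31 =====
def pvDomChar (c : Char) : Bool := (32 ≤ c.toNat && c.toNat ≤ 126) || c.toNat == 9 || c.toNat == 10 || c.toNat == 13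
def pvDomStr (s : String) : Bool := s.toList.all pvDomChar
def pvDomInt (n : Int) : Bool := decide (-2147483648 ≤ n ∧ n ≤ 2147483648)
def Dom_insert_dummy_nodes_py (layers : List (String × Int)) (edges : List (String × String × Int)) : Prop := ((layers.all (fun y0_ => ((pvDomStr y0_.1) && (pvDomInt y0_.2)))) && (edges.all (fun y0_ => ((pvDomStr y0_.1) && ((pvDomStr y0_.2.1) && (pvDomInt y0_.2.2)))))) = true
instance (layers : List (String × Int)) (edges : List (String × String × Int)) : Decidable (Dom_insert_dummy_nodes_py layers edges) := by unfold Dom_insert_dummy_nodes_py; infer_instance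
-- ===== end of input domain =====

-- B replaces A's single interleaved loop (threaded `prev` node, counter, and in-place emission)
-- by a plan-then-assemble algorithm: pass 1 records a per-edge schedule with closed-form dummy-id
-- offsets, then dummy_info and new_edges are assembled by independent passes over the schedule.


-- ===== PORT A =====
-- shared helper: the dummy-id string "__dummy_" + str(c)
def pvName (c : Int) : String := "__dummy_" ++ PySem.Int.toStr c

-- one iteration of A's `for s, t, idx in edges` loop; state = (new_layers, new_edges, dummy_info, dummy_counter)
-- `new_layers[s]` is ported as getD with default 0: Pre_ excludes the KeyError inputs, so the default is never read there
def stepA (st : PySem.Dict String Int × List (String × String × Int) × PySem.Dict String (String × String × Int) × Int)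
    (e : String × String × Int) :
    PySem.Dict String Int × List (String × String × Int) × PySem.Dict String (String × String × Int) × Int :=
  let s := e.1; let t := e.2.1; let idx := e.2.2
  let ls := st.1.getD s 0
  let lt := st.1.getD t 0
  let span := lt - ls
  if span ≤ 1 then
    (st.1, st.2.1 ++ [(s, t, idx)], st.2.2.1, st.2.2.2)
  else
    -- chain of dummy nodes, threading `prev`
    let inner := (PySem.List.pyRange 1 span).foldl
      (fun (q : PySem.Dict String Int × List (String × String × Int) × PySem.Dict String (String × String × Int) × Int × String) i =>
        let d := pvName q.2.2.2.1
        (q.1.insert d (ls + i), q.2.1 ++ [(q.2.2.2.2, d, idx)], q.2.2.1.insert d (s, t, idx), q.2.2.2.1 + 1, d))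
      (st.1, st.2.1, st.2.2.1, st.2.2.2, s)
    (inner.1, inner.2.1 ++ [(inner.2.2.2.2, t, idx)], inner.2.2.1, inner.2.2.2.1)

def insert_dummy_nodes_py (layers : List (String × Int)) (edges : List (String × String × Int)) : (List (String × Int)) × (List (String × String × Int)) × (List (String × String × String × Int)) :=
  let fin := edges.foldl stepA (PySem.Dict.ofList layers, [], PySem.Dict.empty, 0)
  -- the returned dicts are rendered as their insertion-ordered item lists
  (fin.1.items, fin.2.1, fin.2.2.1.items.map (fun p => (p.1, p.2)))

-- ===== PORT B =====
-- plan-then-assemble: pass 1 builds new_layers and the schedule of (s, t, idx, ls, count, offset)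
-- records; passes 2 and 3 assemble dummy_info and new_edges independently from the schedule
def insert_dummy_nodes_py_alt (layers : List (String × Int)) (edges : List (String × String × Int)) : (List (String × Int)) × (List (String × String × Int)) × (List (String × String × String × Int)) :=
  -- pass 1: state = (new_layers, schedule, total)
  let p1 := edges.foldl
    (fun (st : PySem.Dict String Int × List (String × String × Int × Int × Int × Int) × Int) e =>
      let ls := st.1.getD e.1 0
      let c := max (st.1.getD e.2.1 0 - ls - 1) 0
      let sched := st.2.1 ++ [(e.1, e.2.1, e.2.2, ls, c, st.2.2)]
      let nl := (PySem.List.pyRange 0 c).foldl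
        (fun d k => d.insert (pvName (st.2.2 + k)) (ls + 1 + k)) st.1
      (nl, sched, st.2.2 + c))
    (PySem.Dict.ofList layers, [], 0)
  -- pass 2: dummy_info, a dict comprehension over the schedule
  let di := p1.2.1.foldl
    (fun d q =>
      (PySem.List.pyRange 0 q.2.2.2.2.1).foldl
        (fun d k => d.insert (pvName (q.2.2.2.2.2 + k)) (q.1, q.2.1, q.2.2.1)) d)
    (PySem.Dict.empty : PySem.Dict String (String × String × Int))
  -- pass 3: new_edges, pairing consecutive nodes of each edge's path
  let ne := p1.2.1.foldl
    (fun acc q =>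
      let names := (PySem.List.pyRange 0 q.2.2.2.2.1).map (fun k => pvName (q.2.2.2.2.2 + k))
      let path := q.1 :: (names ++ [q.2.1])
      acc ++ (path.zip (PySem.List.slice path (some 1) none)).map (fun ab => (ab.1, ab.2, q.2.2.1)))
    ([] : List (String × String × Int))
  (p1.1.items, ne, di.items.map (fun p => (p.1, p.2)))

-- ===== PRECONDITION & SPEC =====
-- Pre_ excludes exactly the edges with an endpoint that is no key of the layer dict:
-- both Pythons raise KeyError there (A at `new_layers[s]`/`new_layers[t]`, B in pass 1)
def Pre_insert_dummy_nodes_py (layers : List (String × Int)) (edges : List (String × String × Int)) : Prop :=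
  ∀ e ∈ edges, e.1 ∈ layers.map (·.1) ∧ e.2.1 ∈ layers.map (·.1)
instance (layers : List (String × Int)) (edges : List (String × String × Int)) : Decidable (Pre_insert_dummy_nodes_py layers edges) := by unfold Pre_insert_dummy_nodes_py; infer_instance

def pvWitness_insert_dummy_nodes_py : (List (String × Int)) × (List (String × String × Int)) :=
  ([("a", 0), ("b", 3)], [("a", "b", 7), ("b", "a", 1)])

def Spec_insert_dummy_nodes_py (layers : List (String × Int)) (edges : List (String × String × Int)) (out : (List (String × Int)) × (List (String × String × Int)) × (List (String × String × String × Int))) : Prop := out = insert_dummy_nodes_py_alt layers edges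
instance (layers : List (String × Int)) (edges : List (String × String × Int)) (out : (List (String × Int)) × (List (String × String × Int)) × (List (String × String × String × Int))) : Decidable (Spec_insert_dummy_nodes_py layers edges out) := by unfold Spec_insert_dummy_nodes_py; infer_instance

-- ===== CLAIM (what is proved, stated in full; the proofs are below) =====
def Claim_equal_insert_dummy_nodes_py : Prop := ∀ (layers : List (String × Int)) (edges : List (String × String × Int)), Dom_insert_dummy_nodes_py layers edges → Pre_insert_dummy_nodes_py layers edges → Spec_insert_dummy_nodes_py layers edges (insert_dummy_nodes_py layers edges)

-- ===== LEMMAS AND PROOFS =====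

-- canonical closed forms of one long-edge expansion, shared target of both programs
def nms (c : Int) : Nat → List String
  | 0 => []
  | m + 1 => pvName c :: nms (c + 1) m

def layersIns (nl : PySem.Dict String Int) (ls c a : Int) : Nat → PySem.Dict String Int
  | 0 => nl
  | m + 1 => layersIns (nl.insert (pvName c) (ls + a)) ls (c + 1) (a + 1) m

def infoIns (di : PySem.Dict String (String × String × Int)) (s t : String) (idx c : Int) :
    Nat → PySem.Dict String (String × String × Int)
  | 0 => di
  | m + 1 => infoIns (di.insert (pvName c) (s, t, idx)) s t idx (c + 1) m

def chain (idx : Int) : String → List String → List (String × String × Int)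
  | _, [] => []
  | prev, x :: xs => (prev, x, idx) :: chain idx x xs

-- per-edge dummy count read off the current layer dict
def mOf (nl : PySem.Dict String Int) (e : String × String × Int) : Nat :=
  (nl.getD e.2.1 0 - nl.getD e.1 0 - 1).toNat

-- the canonical schedule and its layers/counter threading
def plan : PySem.Dict String Int → Int → List (String × String × Int) →
    List (String × String × Int × Int × Int × Int)
  | _, _, [] => []
  | nl, c, e :: es =>
      (e.1, e.2.1, e.2.2, nl.getD e.1 0, ((mOf nl e : Nat) : Int), c)
        :: plan (layersIns nl (nl.getD e.1 0) c 1 (mOf nl e)) (c + (mOf nl e : Int)) es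

def planNL : PySem.Dict String Int → Int → List (String × String × Int) → PySem.Dict String Int
  | nl, _, [] => nl
  | nl, c, e :: es => planNL (layersIns nl (nl.getD e.1 0) c 1 (mOf nl e)) (c + (mOf nl e : Int)) es

def planC : PySem.Dict String Int → Int → List (String × String × Int) → Int
  | _, c, [] => c
  | nl, c, e :: es => planC (layersIns nl (nl.getD e.1 0) c 1 (mOf nl e)) (c + (mOf nl e : Int)) es

-- the two assembled outputs, read off a schedule
def NEof : List (String × String × Int × Int × Int × Int) → List (String × String × Int)
  | [] => []
  | q :: qs =>
      (chain q.2.2.1 q.1 (nms q.2.2.2.2.2 q.2.2.2.2.1.toNat)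
        ++ [((nms q.2.2.2.2.2 q.2.2.2.2.1.toNat).getLastD q.1, q.2.1, q.2.2.1)]) ++ NEof qs

def DIof : PySem.Dict String (String × String × Int) → List (String × String × Int × Int × Int × Int) →
    PySem.Dict String (String × String × Int)
  | di, [] => di
  | di, q :: qs => DIof (infoIns di q.1 q.2.1 q.2.2.1 q.2.2.2.2.2 q.2.2.2.2.1.toNat) qs

-- A's inner `for i in range(1, span)` loop, fully generalized
theorem innerA_eq (s t : String) (idx ls : Int) (m : Nat) :
    ∀ (a c : Int) (prev : String) (nl : PySem.Dict String Int)
      (ne : List (String × String × Int)) (di : PySem.Dict String (String × String × Int)),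
    (PySem.List.pyRange a (a + m)).foldl
      (fun (q : PySem.Dict String Int × List (String × String × Int) × PySem.Dict String (String × String × Int) × Int × String) i =>
        let d := pvName q.2.2.2.1
        (q.1.insert d (ls + i), q.2.1 ++ [(q.2.2.2.2, d, idx)], q.2.2.1.insert d (s, t, idx), q.2.2.2.1 + 1, d))
      (nl, ne, di, c, prev)
    = (layersIns nl ls c a m, ne ++ chain idx prev (nms c m), infoIns di s t idx c m,
       c + m, (nms c m).getLastD prev) := by
  induction m with
  | zero =>
      intro a c prev nl ne di
      simp [nms, layersIns, infoIns, chain]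
  | succ m ih =>
      intro a c prev nl ne di
      have hlt : a < a + ((m : Nat) + 1 : Nat) := by push_cast; omega
      rw [PySem.List.pyRange_one_cons hlt]
      have hsh : a + ((m : Nat) + 1 : Nat) = (a + 1) + (m : Nat) := by push_cast; ring
      rw [hsh]
      simp only [List.foldl_cons]
      rw [ih (a + 1) (c + 1) (pvName c) (nl.insert (pvName c) (ls + a))
            (ne ++ [(prev, pvName c, idx)]) (di.insert (pvName c) (s, t, idx))]
      simp only [nms, layersIns, infoIns, chain, List.getLastD_cons, Prod.mk.injEq,
        List.append_assoc, List.cons_append, List.nil_append]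
      push_cast
      ring_nf
      exact ⟨trivial, trivial, trivial, trivial, trivial⟩

-- A's edge fold equals the canonical schedule semantics
theorem foldA_eq :
    ∀ (es : List (String × String × Int)) (nl : PySem.Dict String Int)
      (ne : List (String × String × Int)) (di : PySem.Dict String (String × String × Int)) (c : Int),
    es.foldl stepA (nl, ne, di, c)
      = (planNL nl c es, ne ++ NEof (plan nl c es), DIof di (plan nl c es), planC nl c es) := by
  intro es
  induction es with
  | nil => intro nl ne di c; simp [plan, planNL, planC, NEof, DIof]
  | cons e es ih =>
      intro nl ne di c
      have hstep : stepA (nl, ne, di, c) e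
          = (layersIns nl (nl.getD e.1 0) c 1 (mOf nl e),
             ne ++ (chain e.2.2 e.1 (nms c (mOf nl e)) ++ [((nms c (mOf nl e)).getLastD e.1, e.2.1, e.2.2)]),
             infoIns di e.1 e.2.1 e.2.2 c (mOf nl e),
             c + (mOf nl e : Int)) := by
        obtain ⟨s, t, idx⟩ := e
        simp only [stepA]
        set ls := nl.getD s 0 with hls
        set lt := nl.getD t 0 with hlt
        by_cases h : lt - ls ≤ 1
        · have hm : mOf nl (s, t, idx) = 0 := by
            simp only [mOf, ← hls, ← hlt]; omega
          simp [h, hm, layersIns, infoIns, nms, chain]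
        · have hm : lt - ls = 1 + (mOf nl (s, t, idx) : Int) := by
            simp only [mOf, ← hls, ← hlt]; omega
          simp only [if_neg h]
          rw [hm, innerA_eq s t idx ls (mOf nl (s, t, idx)) 1 c s nl ne di]
          simp [List.append_assoc]
      rw [List.foldl_cons, hstep, ih]
      simp [plan, planNL, planC, NEof, DIof, List.append_assoc]

-- B's inner registration loops equal the canonical layer/info updates
theorem innerB_nl (ls : Int) (m : Nat) : ∀ (o a : Int) (d : PySem.Dict String Int),
    (List.range m).foldl (fun d (k : Nat) => d.insert (pvName (o + k)) (ls + a + k)) d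
      = layersIns d ls o a m := by
  induction m with
  | zero => intro o a d; simp [layersIns]
  | succ m ih =>
      intro o a d
      rw [List.range_succ_eq_map, List.foldl_cons, List.foldl_map, layersIns]
      have hf : ∀ (d : PySem.Dict String Int) (k : Nat),
          d.insert (pvName (o + ((k + 1 : Nat) : Int))) (ls + a + ((k + 1 : Nat) : Int))
            = d.insert (pvName (o + 1 + (k : Int))) (ls + (a + 1) + (k : Int)) := by
        intro d k
        have h1 : o + ((k + 1 : Nat) : Int) = o + 1 + (k : Int) := by push_cast; ring
        have h2 : ls + a + ((k + 1 : Nat) : Int) = ls + (a + 1) + (k : Int) := by push_cast; ring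
        rw [h1, h2]
      simp only [Nat.succ_eq_add_one, Nat.cast_zero, add_zero, hf]
      exact ih (o + 1) (a + 1) _

theorem innerB_di (v : String × String × Int) (m : Nat) :
    ∀ (o : Int) (d : PySem.Dict String (String × String × Int)),
    (List.range m).foldl (fun d (k : Nat) => d.insert (pvName (o + k)) v) d
      = infoIns d v.1 v.2.1 v.2.2 o m := by
  induction m with
  | zero => intro o d; simp [infoIns]
  | succ m ih =>
      intro o d
      rw [List.range_succ_eq_map, List.foldl_cons, List.foldl_map, infoIns]
      have hf : ∀ (d : PySem.Dict String (String × String × Int)) (k : Nat),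
          d.insert (pvName (o + ((k + 1 : Nat) : Int))) v = d.insert (pvName (o + 1 + (k : Int))) v := by
        intro d k
        have h1 : o + ((k + 1 : Nat) : Int) = o + 1 + (k : Int) := by push_cast; ring
        rw [h1]
      simp only [Nat.succ_eq_add_one, Nat.cast_zero, add_zero, hf]
      exact ih (o + 1) _

-- B's name-list comprehension equals the canonical name list
theorem range_map_nms (m : Nat) : ∀ (c : Int),
    (List.range m).map (fun j => pvName (c + (j : Nat))) = nms c m := by
  induction m with
  | zero => intro c; simp [nms]
  | succ m ih =>
      intro c
      rw [List.range_succ_eq_map, List.map_cons, List.map_map, nms]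
      congr 1
      · norm_num
      rw [← ih (c + 1)]
      apply List.map_congr_left
      intro j _
      simp only [Function.comp_apply, Nat.succ_eq_add_one]
      push_cast
      ring_nf

theorem namesB_eq (m : Nat) (c : Int) :
    (PySem.List.pyRange 0 (m : Int)).map (fun k => pvName (c + k)) = nms c m := by
  rw [PySem.List.pyRange_zero_natCast, List.map_map]
  exact range_map_nms m c

-- pairing the path equals the threaded chain plus the closing edge
theorem zip_chain (idx : Int) (t : String) :
    ∀ (names : List String) (prev : String),
    ((prev :: (names ++ [t])).zip (names ++ [t])).map (fun ab => (ab.1, ab.2, idx))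
    = chain idx prev names ++ [(names.getLastD prev, t, idx)] := by
  intro names
  induction names with
  | nil => intro prev; simp [chain]
  | cons x xs ihx =>
      intro prev
      simp only [List.cons_append, List.zip_cons_cons, List.map_cons, chain, List.getLastD_cons]
      rw [ihx x]

-- B's pass 1 computes the canonical layers, schedule and counter
theorem pass1_eq :
    ∀ (es : List (String × String × Int)) (nl : PySem.Dict String Int)
      (sch : List (String × String × Int × Int × Int × Int)) (c : Int),
    es.foldl
      (fun (st : PySem.Dict String Int × List (String × String × Int × Int × Int × Int) × Int) e =>
        let ls := st.1.getD e.1 0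
        let c := max (st.1.getD e.2.1 0 - ls - 1) 0
        let sched := st.2.1 ++ [(e.1, e.2.1, e.2.2, ls, c, st.2.2)]
        let nl := (PySem.List.pyRange 0 c).foldl
          (fun d k => d.insert (pvName (st.2.2 + k)) (ls + 1 + k)) st.1
        (nl, sched, st.2.2 + c))
      (nl, sch, c)
      = (planNL nl c es, sch ++ plan nl c es, planC nl c es) := by
  intro es
  induction es with
  | nil => intro nl sch c; simp [plan, planNL, planC]
  | cons e es ih =>
      intro nl sch c
      rw [List.foldl_cons]
      dsimp only
      have hmax : max (nl.getD e.2.1 0 - nl.getD e.1 0 - 1) 0 = ((mOf nl e : Nat) : Int) := by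
        rw [mOf, Int.ofNat_toNat]
      rw [hmax, PySem.List.pyRange_zero_natCast, List.foldl_map, innerB_nl, ih]
      simp [plan, planNL, planC, List.append_assoc]

-- B's pass 2 over the canonical schedule assembles the canonical dummy_info
theorem pass2_eq :
    ∀ (es : List (String × String × Int)) (nl : PySem.Dict String Int) (c : Int)
      (di : PySem.Dict String (String × String × Int)),
    (plan nl c es).foldl
      (fun d q =>
        (PySem.List.pyRange 0 q.2.2.2.2.1).foldl
          (fun d k => d.insert (pvName (q.2.2.2.2.2 + k)) (q.1, q.2.1, q.2.2.1)) d) di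
      = DIof di (plan nl c es) := by
  intro es
  induction es with
  | nil => intro nl c di; rfl
  | cons e es ih =>
      intro nl c di
      rw [plan, List.foldl_cons, DIof]
      dsimp only
      rw [PySem.List.pyRange_zero_natCast, List.foldl_map, innerB_di (e.1, e.2.1, e.2.2),
        Int.toNat_natCast]
      exact ih _ _ _

-- B's pass 3 over the canonical schedule assembles the canonical new_edges
theorem pass3_eq :
    ∀ (es : List (String × String × Int)) (nl : PySem.Dict String Int) (c : Int)
      (acc : List (String × String × Int)),
    (plan nl c es).foldl
      (fun acc q =>
        let names := (PySem.List.pyRange 0 q.2.2.2.2.1).map (fun k => pvName (q.2.2.2.2.2 + k))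
        let path := q.1 :: (names ++ [q.2.1])
        acc ++ (path.zip (PySem.List.slice path (some 1) none)).map (fun ab => (ab.1, ab.2, q.2.2.1))) acc
      = acc ++ NEof (plan nl c es) := by
  intro es
  induction es with
  | nil => intro nl c acc; simp [plan, NEof]
  | cons e es ih =>
      intro nl c acc
      rw [plan, List.foldl_cons, NEof]
      dsimp only
      rw [namesB_eq, PySem.List.slice_from_one, List.tail_cons, zip_chain, ih,
        Int.toNat_natCast]
      simp [List.append_assoc]

-- ===== VERDICT (by name: the statement is the Claim_ definition above) =====
theorem insert_dummy_nodes_py_spec : Claim_equal_insert_dummy_nodes_py := by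
  intro layers edges _ _
  unfold Spec_insert_dummy_nodes_py insert_dummy_nodes_py insert_dummy_nodes_py_alt
  rw [foldA_eq, pass1_eq]
  dsimp only
  simp only [List.nil_append]
  rw [pass2_eq, pass3_eq, List.nil_append]
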